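-- pv_equiv track=rewrite | github.com/marusyalandau/termin_bot | bot.py | _format_slots_by_date_for_message
-- ===== SOURCE A (Python) =====
-- def _format_slots_by_date_for_message(slots_by_date: dict[str, list[str]], new_keys: set[str]) -> str:
--     """Build a readable date-only message block for newly discovered slots."""
--     dates: list[str] = []
--     for date in sorted(slots_by_date):
--         has_new_time = any(f"{date}|{slot_time}" in new_keys for slot_time in slots_by_date[date])
--         has_date_only_key = f"{date}|" in new_keys
--         if has_new_time or has_date_only_key:
--             dates.append(date)
--
--     return "\n".join([f"  • {date}" for date in dates])
-- ===== SOURCE B (Python) =====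
-- def _format_slots_by_date_for_message(slots_by_date: dict[str, list[str]], new_keys: set[str]) -> str:
--     """Key-driven formatting: index every possible key string by its owning date
--     once, then a single pass over new_keys collects the hit dates (no per-date
--     scan of new_keys)."""
--     pairs = [(f"{date}|{t}", date)
--              for date, times in slots_by_date.items()
--              for t in [""] + times]
--     owners: dict[str, list[str]] = {}
--     for key, date in pairs:
--         owners.setdefault(key, []).append(date)
--     hit: set[str] = set()
--     for k in new_keys:
--         hit.update(owners.get(k, []))
--     return "\n".join(f"  • {d}" for d in sorted(hit))
-- ===== Notes on version B (the rewrite author's own statement) =====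
-- stated objective: alternative
-- what changed: B inverts the traversal: it builds a key-string -> owning-dates index from slots_by_date once, then a single pass over new_keys collects the hit dates into a set, sorted at the end - instead of A's loop over sorted dates with an any-scan of each date's slots against new_keys.
import Mathlib
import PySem

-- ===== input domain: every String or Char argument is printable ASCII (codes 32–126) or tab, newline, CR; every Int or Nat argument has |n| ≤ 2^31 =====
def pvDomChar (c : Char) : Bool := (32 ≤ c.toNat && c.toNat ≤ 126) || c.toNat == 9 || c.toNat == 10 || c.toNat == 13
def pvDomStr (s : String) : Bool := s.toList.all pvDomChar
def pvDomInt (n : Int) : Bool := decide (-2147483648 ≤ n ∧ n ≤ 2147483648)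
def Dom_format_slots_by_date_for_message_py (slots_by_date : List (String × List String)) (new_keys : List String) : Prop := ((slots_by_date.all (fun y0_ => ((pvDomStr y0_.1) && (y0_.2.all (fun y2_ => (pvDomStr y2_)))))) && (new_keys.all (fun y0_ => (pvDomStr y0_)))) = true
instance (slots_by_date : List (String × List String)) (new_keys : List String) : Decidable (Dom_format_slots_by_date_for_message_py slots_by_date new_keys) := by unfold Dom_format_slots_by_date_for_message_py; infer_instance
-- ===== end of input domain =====

-- B replaces A's per-date scan of new_keys by a key→date index built once and a single
-- pass over new_keys (alternative decomposition; not measurably faster at these sizes).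


-- ===== PORT A =====
def format_slots_by_date_for_message_py (slots_by_date : List (String × List String)) (new_keys : List String) : String :=
  let d := PySem.Dict.mk slots_by_date
  let dates : List String :=
    (PySem.List.sorted d.keys (fun x => x) false).foldl
      (fun acc date =>
        let has_new_time := (d.getD date []).any (fun slot_time => new_keys.contains (date ++ "|" ++ slot_time))
        let has_date_only_key := new_keys.contains (date ++ "|")
        if has_new_time || has_date_only_key then acc ++ [date] else acc) []
  PySem.Str.join "\n" (dates.map (fun date => "  • " ++ date))

-- ===== PORT B =====
def pvPairs (slots_by_date : List (String × List String)) : List (String × String) :=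
  slots_by_date.flatMap (fun p => ("" :: p.2).map (fun t => (p.1 ++ "|" ++ t, p.1)))

def pvOwners (slots_by_date : List (String × List String)) : PySem.Dict String (List String) :=
  (pvPairs slots_by_date).foldl (fun d q => d.modify q.1 [] (· ++ [q.2])) PySem.Dict.empty

def pvHit (slots_by_date : List (String × List String)) (new_keys : List String) : PySem.Set String :=
  new_keys.foldl (fun s k => PySem.Set.update s ((pvOwners slots_by_date).getD k [])) PySem.Set.empty

def format_slots_by_date_for_message_py_alt (slots_by_date : List (String × List String)) (new_keys : List String) : String :=
  PySem.Str.join "\n" ((PySem.List.sorted (pvHit slots_by_date new_keys) (fun x => x) false).map (fun d => "  • " ++ d))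

-- ===== PRECONDITION & SPEC =====
-- Pre_ requires the association-list keys to be distinct: the Python argument is a dict,
-- which cannot contain duplicate keys, so no Python-representable input is excluded.
def Pre_format_slots_by_date_for_message_py (slots_by_date : List (String × List String)) (new_keys : List String) : Prop :=
  (slots_by_date.map Prod.fst).Nodup
instance (slots_by_date : List (String × List String)) (new_keys : List String) : Decidable (Pre_format_slots_by_date_for_message_py slots_by_date new_keys) := by unfold Pre_format_slots_by_date_for_message_py; infer_instance

def pvWitness_format_slots_by_date_for_message_py : (List (String × List String)) × List String :=
  ([("2024-01-02", ["10:00", "11:00"]), ("2024-01-03", [])], ["2024-01-02|10:00", "2024-01-03|"])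

def Spec_format_slots_by_date_for_message_py (slots_by_date : List (String × List String)) (new_keys : List String) (out : String) : Prop := out = format_slots_by_date_for_message_py_alt slots_by_date new_keys
instance (slots_by_date : List (String × List String)) (new_keys : List String) (out : String) : Decidable (Spec_format_slots_by_date_for_message_py slots_by_date new_keys out) := by unfold Spec_format_slots_by_date_for_message_py; infer_instance

-- ===== CLAIM (what is proved, stated in full; the proofs are below) =====
def Claim_equal_format_slots_by_date_for_message_py : Prop := ∀ (slots_by_date : List (String × List String)) (new_keys : List String), Dom_format_slots_by_date_for_message_py slots_by_date new_keys → Pre_format_slots_by_date_for_message_py slots_by_date new_keys → Spec_format_slots_by_date_for_message_py slots_by_date new_keys (format_slots_by_date_for_message_py slots_by_date new_keys)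

-- ===== LEMMAS AND PROOFS =====

theorem format_slots_by_date_for_message_py_witness_ok :
    Dom_format_slots_by_date_for_message_py pvWitness_format_slots_by_date_for_message_py.1 pvWitness_format_slots_by_date_for_message_py.2 ∧
    Pre_format_slots_by_date_for_message_py pvWitness_format_slots_by_date_for_message_py.1 pvWitness_format_slots_by_date_for_message_py.2 := by
  constructor <;> decide

-- the per-date condition both programs decide, as A writes it
def pvPred (slots_by_date : List (String × List String)) (new_keys : List String) (date : String) : Bool :=
  ((PySem.Dict.mk slots_by_date).getD date []).any (fun slot_time => new_keys.contains (date ++ "|" ++ slot_time)) || new_keys.contains (date ++ "|")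

theorem pv_mem_foldl_update (g : String → List String) (nk : List String) (s : PySem.Set String) (x : String) :
    x ∈ nk.foldl (fun s k => PySem.Set.update s (g k)) s ↔ x ∈ s ∨ ∃ k ∈ nk, x ∈ g k := by
  induction nk generalizing s with
  | nil => simp
  | cons k rest ih => simp [List.foldl_cons, ih, PySem.Set.mem_update]; tauto

theorem pv_nodup_foldl_update (g : String → List String) (nk : List String) (s : PySem.Set String) (h : s.Nodup) :
    (nk.foldl (fun s k => PySem.Set.update s (g k)) s).Nodup := by
  induction nk generalizing s with
  | nil => exact h
  | cons k rest ih => exact ih _ (PySem.Set.nodup_update _ _ h)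

theorem pv_mem_getD_owners (sbd : List (String × List String)) (k d : String) :
    d ∈ (pvOwners sbd).getD k [] ↔ (k, d) ∈ pvPairs sbd := by
  unfold pvOwners
  rw [PySem.Dict.getD_foldl_modify_append]
  simp only [PySem.Dict.getD_empty, List.nil_append, List.mem_map, List.mem_filter, beq_iff_eq]
  constructor
  · rintro ⟨⟨q1, q2⟩, ⟨hq, hk⟩, hd⟩
    simp_all
  · intro h
    exact ⟨(k, d), ⟨h, rfl⟩, rfl⟩

theorem pv_mem_pairs (sbd : List (String × List String)) (k d : String) :
    (k, d) ∈ pvPairs sbd ↔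
      ∃ ts, (d, ts) ∈ sbd ∧ (k = d ++ "|" ∨ ∃ t ∈ ts, k = d ++ "|" ++ t) := by
  unfold pvPairs
  simp only [List.mem_flatMap, List.mem_map, List.mem_cons, Prod.mk.injEq]
  constructor
  · rintro ⟨⟨d0, ts⟩, hmem, t, ht, hk, rfl⟩
    refine ⟨ts, hmem, ?_⟩
    rcases ht with rfl | ht
    · left; rw [← hk]; simp [String.append_empty]
    · right; exact ⟨t, ht, hk.symm⟩
  · rintro ⟨ts, hmem, hk⟩
    refine ⟨(d, ts), hmem, ?_⟩
    rcases hk with rfl | ⟨t, ht, rfl⟩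
    · exact ⟨"", Or.inl rfl, by simp [String.append_empty], rfl⟩
    · exact ⟨t, Or.inr ht, rfl, rfl⟩

theorem pv_getD_mk (sbd : List (String × List String)) (hnd : (sbd.map Prod.fst).Nodup)
    {d : String} {ts : List String} (h : (d, ts) ∈ sbd) :
    (PySem.Dict.mk sbd).getD d [] = ts := by
  apply PySem.Dict.getD_of_mem_items (d := PySem.Dict.mk sbd) h
  simpa [PySem.Dict.keys] using hnd

theorem pv_hit_iff (sbd : List (String × List String)) (nk : List String)
    (hnd : (sbd.map Prod.fst).Nodup) (d : String) :
    d ∈ pvHit sbd nk ↔ d ∈ sbd.map Prod.fst ∧ pvPred sbd nk d = true := by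
  unfold pvHit
  rw [pv_mem_foldl_update]
  simp only [PySem.Set.empty, List.not_mem_nil, false_or]
  constructor
  · rintro ⟨k, hknk, hkd⟩
    rw [pv_mem_getD_owners, pv_mem_pairs] at hkd
    obtain ⟨ts, hmem, hcase⟩ := hkd
    have hgd := pv_getD_mk sbd hnd hmem
    refine ⟨List.mem_map.mpr ⟨(d, ts), hmem, rfl⟩, ?_⟩
    unfold pvPred
    rw [hgd]
    rcases hcase with rfl | ⟨t, ht, rfl⟩
    · simp only [Bool.or_eq_true, List.contains_eq_mem, decide_eq_true_eq]
      right; exact hknk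
    · simp only [Bool.or_eq_true, List.any_eq_true, List.contains_eq_mem, decide_eq_true_eq]
      left; exact ⟨t, ht, hknk⟩
  · rintro ⟨hd, hp⟩
    obtain ⟨⟨d0, ts⟩, hmem, rfl⟩ := List.mem_map.mp hd
    have hgd := pv_getD_mk sbd hnd hmem
    unfold pvPred at hp
    rw [hgd] at hp
    simp only [Bool.or_eq_true, List.any_eq_true, List.contains_eq_mem, decide_eq_true_eq] at hp
    rcases hp with ⟨t, ht, hk⟩ | hk
    · refine ⟨d0 ++ "|" ++ t, hk, ?_⟩
      rw [pv_mem_getD_owners, pv_mem_pairs]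
      exact ⟨ts, hmem, Or.inr ⟨t, ht, rfl⟩⟩
    · refine ⟨d0 ++ "|", hk, ?_⟩
      rw [pv_mem_getD_owners, pv_mem_pairs]
      exact ⟨ts, hmem, Or.inl rfl⟩

theorem pv_nodup_hit (sbd : List (String × List String)) (nk : List String) :
    (pvHit sbd nk).Nodup := by
  unfold pvHit
  exact pv_nodup_foldl_update _ _ _ List.nodup_nil

theorem pvA_eq (sbd : List (String × List String)) (nk : List String) :
    format_slots_by_date_for_message_py sbd nk =
    PySem.Str.join "\n" (((PySem.List.sorted (PySem.Dict.mk sbd).keys (fun x => x) false).filter (pvPred sbd nk)).map (fun date => "  • " ++ date)) := by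
  have h : format_slots_by_date_for_message_py sbd nk =
      PySem.Str.join "\n" (((PySem.List.sorted (PySem.Dict.mk sbd).keys (fun x => x) false).foldl
        (fun acc date => if pvPred sbd nk date = true then acc ++ [date] else acc) []).map (fun date => "  • " ++ date)) := rfl
  rw [h, PySem.List.foldl_append_if_eq_filter, List.nil_append]

theorem pv_sorted_hit (sbd : List (String × List String)) (nk : List String)
    (hnd : (sbd.map Prod.fst).Nodup) :
    PySem.List.sorted (pvHit sbd nk) (fun x => x) false
      = (PySem.List.sorted (sbd.map Prod.fst) (fun x => x) false).filter (pvPred sbd nk) := by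
  apply PySem.List.sorted_eq_of_perm_of_pairwise_lt
  · -- permutation
    have h1 : ((PySem.List.sorted (sbd.map Prod.fst) (fun x => x) false).filter (pvPred sbd nk)).Perm
        ((sbd.map Prod.fst).filter (pvPred sbd nk)) :=
      (PySem.List.sorted_perm _ _ _).filter _
    have h2 : ((sbd.map Prod.fst).filter (pvPred sbd nk)).Perm (pvHit sbd nk) := by
      rw [List.perm_ext_iff_of_nodup (hnd.filter _) (pv_nodup_hit sbd nk)]
      intro a
      rw [List.mem_filter, pv_hit_iff sbd nk hnd]
    exact h1.trans h2
  · -- strictly increasing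
    have hs : (PySem.List.sorted (sbd.map Prod.fst) (fun x => x) false).Nodup :=
      ((PySem.List.sorted_perm (sbd.map Prod.fst) (fun x => x) false).nodup_iff).mpr hnd
    have hle := PySem.List.sorted_pairwise (sbd.map Prod.fst) (fun x => x)
    have hlt : (PySem.List.sorted (sbd.map Prod.fst) (fun x => x) false).Pairwise (fun a b => a < b) :=
      (hle.and hs).imp (fun h => lt_of_le_of_ne h.1 h.2)
    exact hlt.filter _

-- ===== VERDICT (by name: the statement is the Claim_ definition above) =====
theorem format_slots_by_date_for_message_py_spec : Claim_equal_format_slots_by_date_for_message_py := by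
  intro sbd nk _hdom hpre
  unfold Spec_format_slots_by_date_for_message_py
  rw [pvA_eq]
  unfold format_slots_by_date_for_message_py_alt
  have hkeys : (PySem.Dict.mk sbd).keys = sbd.map Prod.fst := by
    simp [PySem.Dict.keys]
  rw [hkeys, pv_sorted_hit sbd nk hpre]
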